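-- pv_equiv track=rewrite | github.com/m1sterzer0/DaveProgrammingCompetitions | hackercup/python/2014/2_B.py | getHands
-- ===== SOURCE A (Python) =====
-- def getHands(N) :
--     hands = []
--     highsum = N + N - 1
--     lowsum = 3
--     for s in range(lowsum,highsum+1) :
--         for high in range(2,N+1) :
--             low = s-high
--             if low < high and low >= 1 :
--                 hands.append((high,low))
--     return hands
-- ===== SOURCE B (Python) =====
-- def getHands(N):
--     pairs = []
--     for high in range(2, N + 1):
--         for low in range(1, high):
--             pairs.append((high, low))
--     return sorted(pairs, key=lambda p: (p[0] + p[1], p[0]))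
-- ===== Notes on version B (the rewrite author's own statement) =====
-- stated objective: alternative
-- what changed: A scans every possible sum value and re-filters the entire high-range for each sum; B generates each valid (high, low) pair exactly once with a simple nested loop and then sorts by the key (high+low, high), which uniquely reproduces A's sum-then-high order.
import Mathlib
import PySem

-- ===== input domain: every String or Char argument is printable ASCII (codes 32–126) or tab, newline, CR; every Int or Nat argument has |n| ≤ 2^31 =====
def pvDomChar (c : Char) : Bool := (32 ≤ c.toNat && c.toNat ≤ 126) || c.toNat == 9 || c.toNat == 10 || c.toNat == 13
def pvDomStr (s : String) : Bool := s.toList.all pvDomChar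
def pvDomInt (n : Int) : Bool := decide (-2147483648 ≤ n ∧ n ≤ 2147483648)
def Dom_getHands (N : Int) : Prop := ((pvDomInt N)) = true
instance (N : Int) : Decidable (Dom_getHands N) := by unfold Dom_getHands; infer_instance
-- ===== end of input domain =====

-- B replaces A's scan over every sum s (re-filtering the whole high-range for each s) by a
-- nested loop generating each valid pair once, followed by a sort on the key (high+low, high);
-- objective: alternative algorithm (generate-then-sort), not claimed faster.

-- ===== PORT A =====
def getHands (N : Int) : List (Int × Int) :=
  (PySem.List.pyRange 3 ((N + N - 1) + 1) 1).foldl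
    (fun hands s =>
      (PySem.List.pyRange 2 (N + 1) 1).foldl
        (fun hands high =>
          if s - high < high ∧ 1 ≤ s - high then hands ++ [(high, s - high)] else hands)
        hands)
    []

-- ===== PORT B =====
def getHands_alt (N : Int) : List (Int × Int) :=
  PySem.List.sorted2
    ((PySem.List.pyRange 2 (N + 1) 1).foldl
      (fun pairs high =>
        (PySem.List.pyRange 1 high 1).foldl (fun pairs low => pairs ++ [(high, low)]) pairs)
      [])
    (fun p => p.1 + p.2) (fun p => p.1) false

-- ===== PRECONDITION & SPEC =====
def Spec_getHands (N : Int) (out : List (Int × Int)) : Prop := out = getHands_alt N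
instance (N : Int) (out : List (Int × Int)) : Decidable (Spec_getHands N out) := by unfold Spec_getHands; infer_instance

-- ===== CLAIM (what is proved, stated in full; the proofs are below) =====
def Claim_equal_getHands : Prop := ∀ (N : Int), Dom_getHands N → Spec_getHands N (getHands N)

-- ===== LEMMAS AND PROOFS =====

def pvKey (p : Int × Int) : Lex (Int × Int) := toLex (p.1 + p.2, p.1)

theorem lex_cmp (a b c d : Int) :
    (decide (a < c) || (!decide (c < a) && decide (b < d))) = decide (toLex (a, b) < toLex (c, d)) := by
  rcases lt_trichotomy a c with h | h | h <;> simp [Prod.Lex.lt_iff, h] <;> omega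

theorem sorted2_eq_sorted_lex (xs : List (Int × Int)) (k1 k2 : (Int × Int) → Int) :
    PySem.List.sorted2 xs k1 k2 false
      = PySem.List.sorted xs (fun x => toLex (k1 x, k2 x)) false := by
  unfold PySem.List.sorted2 PySem.List.sorted
  simp only [if_neg (by decide : ¬ (false = true))]
  have hb : (fun a b => decide (k1 a < k1 b) || !decide (k1 b < k1 a) && decide (k2 a < k2 b))
      = (fun a b : Int × Int => decide ((fun x => toLex (k1 x, k2 x)) a < (fun x => toLex (k1 x, k2 x)) b)) := by
    funext a b
    exact lex_cmp (k1 a) (k2 a) (k1 b) (k2 b)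
  rw [hb]

def pvInner (N s : Int) : List (Int × Int) :=
  ((PySem.List.pyRange 2 (N + 1) 1).filter
      (fun h => decide (s - h < h ∧ 1 ≤ s - h))).map (fun h => (h, s - h))

theorem getHands_nf (N : Int) :
    getHands N = (PySem.List.pyRange 3 ((N + N - 1) + 1) 1).flatMap (pvInner N) := by
  unfold getHands
  rw [PySem.List.foldl_congr_mem _ _ (fun hands s => hands ++ pvInner N s) _
      (fun acc s _ => PySem.List.foldl_append_ite _ _ _ _),
    PySem.List.foldl_append_eq_flatMap]
  simp

def pvPairs (N : Int) : List (Int × Int) :=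
  (PySem.List.pyRange 2 (N + 1) 1).foldl
    (fun pairs high =>
      (PySem.List.pyRange 1 high 1).foldl (fun pairs low => pairs ++ [(high, low)]) pairs)
    []

theorem pvPairs_nf (N : Int) :
    pvPairs N
      = (PySem.List.pyRange 2 (N + 1) 1).flatMap
          (fun h => (PySem.List.pyRange 1 h 1).map (fun l => (h, l))) := by
  unfold pvPairs
  rw [PySem.List.foldl_congr_mem _ _
      (fun pairs h => pairs ++ (PySem.List.pyRange 1 h 1).map (fun l => (h, l))) _
      (fun acc h _ => PySem.List.foldl_append_singleton_eq_map _ _ _),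
    PySem.List.foldl_append_eq_flatMap]
  simp

theorem count_pyRange (a b x : Int) :
    (PySem.List.pyRange a b 1).count x = if a ≤ x ∧ x < b then 1 else 0 := by
  by_cases h : a ≤ x ∧ x < b
  · rw [if_pos h]
    exact List.count_eq_one_of_mem (PySem.List.nodup_pyRange_one a b)
      (PySem.List.mem_pyRange_one.mpr h)
  · rw [if_neg h]
    exact List.count_eq_zero_of_not_mem (fun hm => h (PySem.List.mem_pyRange_one.mp hm))

theorem sum_map_single (v : Int) (c : Int → Nat) (h0 : ∀ s, s ≠ v → c s = 0) :
    ∀ (l : List Int), l.Nodup → (l.map c).sum = if v ∈ l then c v else 0 := by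
  intro l
  induction l with
  | nil => simp
  | cons a t ih =>
    intro hnd
    rcases List.nodup_cons.mp hnd with ⟨ha, hndt⟩
    by_cases hav : a = v
    · subst hav
      simp [List.map_cons, ih hndt, if_neg ha]
    · simp only [List.map_cons, List.sum_cons, ih hndt, h0 a hav, Nat.zero_add, List.mem_cons]
      by_cases hv : v ∈ t
      · simp [hv]
      · simp only [if_neg hv]
        rw [if_neg (by rintro (h | h); exacts [hav h.symm, hv h])]

theorem count_pvInner (N s h l : Int) :
    (pvInner N s).count (h, l)
      = if s = h + l ∧ 2 ≤ h ∧ h ≤ N ∧ 1 ≤ l ∧ l < h then 1 else 0 := by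
  unfold pvInner
  by_cases hl : l = s - h
  · subst hl
    have hinj : Function.Injective (fun x : Int => (x, s - x)) := by
      intro x y hxy
      simpa using congrArg Prod.fst hxy
    rw [show ((h : Int), s - h) = (fun x : Int => (x, s - x)) h from rfl,
      List.count_map_of_injective _ _ hinj]
    by_cases hp : s - h < h ∧ 1 ≤ s - h
    · rw [List.count_filter (by simpa using hp), count_pyRange]
      split_ifs <;> omega
    · rw [List.count_eq_zero_of_not_mem (by simp [List.mem_filter]; intro _ h2; omega)]
      rw [if_neg (by omega)]
  · rw [List.count_eq_zero_of_not_mem (by simp [List.mem_filter]; intro x _ _ hx hs; omega)]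
    rw [if_neg (by omega)]

theorem count_getHands (N h l : Int) :
    (getHands N).count (h, l) = if 2 ≤ h ∧ h ≤ N ∧ 1 ≤ l ∧ l < h then 1 else 0 := by
  rw [getHands_nf, List.count_flatMap]
  simp only [Function.comp_def, count_pvInner]
  rw [sum_map_single (h + l) _ (fun s hs => if_neg (by omega)) _
    (PySem.List.nodup_pyRange_one _ _)]
  by_cases hm : (h + l) ∈ PySem.List.pyRange 3 ((N + N - 1) + 1) 1
  · rw [if_pos hm]
    split_ifs <;> omega
  · rw [if_neg hm]
    rw [PySem.List.mem_pyRange_one] at hm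
    rw [if_neg (by omega)]

theorem count_pvPairs (N h l : Int) :
    (pvPairs N).count (h, l) = if 2 ≤ h ∧ h ≤ N ∧ 1 ≤ l ∧ l < h then 1 else 0 := by
  rw [pvPairs_nf, List.count_flatMap]
  have hblock : ∀ x : Int,
      ((PySem.List.pyRange 1 x 1).map (fun l' => (x, l'))).count (h, l)
        = if x = h ∧ 1 ≤ l ∧ l < x then 1 else 0 := by
    intro x
    by_cases hx : x = h
    · subst hx
      have hinj : Function.Injective (fun l' : Int => ((x : Int), l')) := by
        intro a b hab
        simpa using congrArg Prod.snd hab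
      rw [show ((x : Int), l) = (fun l' : Int => ((x : Int), l')) l from rfl,
        List.count_map_of_injective _ _ hinj, count_pyRange]
      split_ifs <;> omega
    · rw [List.count_eq_zero_of_not_mem (by simp [hx])]
      rw [if_neg (by tauto)]
  simp only [Function.comp_def, hblock]
  rw [sum_map_single h _ (fun s hs => if_neg (by tauto)) _
    (PySem.List.nodup_pyRange_one _ _)]
  by_cases hm : h ∈ PySem.List.pyRange 2 (N + 1) 1
  · rw [if_pos hm]
    rw [PySem.List.mem_pyRange_one] at hm
    split_ifs <;> omega
  · rw [if_neg hm]
    rw [PySem.List.mem_pyRange_one] at hm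
    rw [if_neg (by omega)]

theorem perm_getHands_pvPairs (N : Int) : (getHands N).Perm (pvPairs N) := by
  rw [List.perm_iff_count]
  rintro ⟨h, l⟩
  rw [count_getHands, count_pvPairs]

theorem pairwise_flatMap {α β : Type} {R : β → β → Prop} {f : α → List β} :
    ∀ {l : List α}, (∀ a ∈ l, (f a).Pairwise R) →
      l.Pairwise (fun a b => ∀ x ∈ f a, ∀ y ∈ f b, R x y) →
      (l.flatMap f).Pairwise R := by
  intro l
  induction l with
  | nil => simp
  | cons a t ih =>
    intro h1 h2
    rw [List.flatMap_cons, List.pairwise_append]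
    rcases List.pairwise_cons.mp h2 with ⟨hab, ht⟩
    refine ⟨h1 a (List.mem_cons_self), ih (fun b hb => h1 b (List.mem_cons_of_mem _ hb)) ht, ?_⟩
    intro x hx y hy
    rcases List.mem_flatMap.mp hy with ⟨b, hb, hyb⟩
    exact hab b hb x hx y hyb

theorem mem_pvInner (N s : Int) (x : Int × Int) (hx : x ∈ pvInner N s) : x.1 + x.2 = s := by
  unfold pvInner at hx
  rcases List.mem_map.mp hx with ⟨h, _, rfl⟩
  simp

theorem pairwise_getHands (N : Int) :
    (getHands N).Pairwise (fun a b => pvKey a < pvKey b) := by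
  rw [getHands_nf]
  apply pairwise_flatMap
  · intro s _
    unfold pvInner
    rw [List.pairwise_map]
    apply List.Pairwise.filter
    apply (PySem.List.pairwise_lt_pyRange_one 2 (N + 1)).imp
    intro a b hab
    rw [pvKey, pvKey, Prod.Lex.lt_iff]
    right
    constructor
    · simp
    · simpa using hab
  · apply (PySem.List.pairwise_lt_pyRange_one _ _).imp
    intro s s' hss x hx y hy
    rw [pvKey, pvKey, Prod.Lex.lt_iff]
    left
    rw [mem_pvInner N s x hx, mem_pvInner N s' y hy]
    simpa using hss

-- ===== VERDICT (by name: the statement is the Claim_ definition above) =====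
theorem getHands_spec : Claim_equal_getHands := by
  intro N _
  unfold Spec_getHands getHands_alt
  show getHands N = PySem.List.sorted2 (pvPairs N) _ _ false
  rw [sorted2_eq_sorted_lex]
  exact (PySem.List.sorted_eq_of_perm_of_pairwise_lt (pvPairs N) (getHands N) pvKey
    (perm_getHands_pvPairs N) (pairwise_getHands N)).symm
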